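-- pv_equiv track=rewrite | github.com/anishbhargav9/EduGen-AI-Powered-Educational-Assistant | src/utils.py | create_study_schedule
-- ===== SOURCE A (Python) =====
-- from typing import Union, List
--
-- def create_study_schedule(topics: List[str], days: int = 7) -> dict:
--     """Create a study schedule for the given topics"""
--
--     if not topics or days <= 0:
--         return {}
--
--     topics_per_day = max(1, len(topics) // days)
--     schedule = {}
--
--     current_day = 1
--     topic_index = 0
--
--     while topic_index < len(topics) and current_day <= days:
--         day_key = f"Day {current_day}"
--         schedule[day_key] = []
--
--         # Assign topics to current day
--         for _ in range(topics_per_day):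
--             if topic_index < len(topics):
--                 schedule[day_key].append(topics[topic_index])
--                 topic_index += 1
--
--         current_day += 1
--
--     # Distribute remaining topics
--     if topic_index < len(topics):
--         for remaining_topic in topics[topic_index:]:
--             # Add to the day with fewest topics
--             min_day = min(schedule.keys(), key=lambda k: len(schedule[k]))
--             schedule[min_day].append(remaining_topic)
--
--     return schedule
-- ===== SOURCE B (Python) =====
-- def create_study_schedule(topics, days=7):
--     """Create a study schedule for the given topics"""
--     if not topics or days <= 0:
--         return {}
--     n = len(topics)
--     if n < days:
--         # one topic per day, only the first n days exist
--         return {f"Day {i + 1}": [topics[i]] for i in range(n)}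
--     q, r = divmod(n, days)
--     # day i gets the i-th block of q topics; the r leftover topics go one
--     # apiece onto the first r days (appended after the block)
--     return {f"Day {i + 1}": topics[i * q:(i + 1) * q]
--             + ([topics[q * days + i]] if i < r else [])
--             for i in range(days)}
-- ===== Notes on version B (the rewrite author's own statement) =====
-- stated objective: faster
-- what changed: Replaced the while-loop that fills days one by one plus the remainder pass that rescans all day keys with min() per leftover topic, by a closed-form dict comprehension that slices each day's block directly and assigns the r = n mod days leftovers to the first r days (ties in A's min always pick the next day in order).
import Mathlib
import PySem

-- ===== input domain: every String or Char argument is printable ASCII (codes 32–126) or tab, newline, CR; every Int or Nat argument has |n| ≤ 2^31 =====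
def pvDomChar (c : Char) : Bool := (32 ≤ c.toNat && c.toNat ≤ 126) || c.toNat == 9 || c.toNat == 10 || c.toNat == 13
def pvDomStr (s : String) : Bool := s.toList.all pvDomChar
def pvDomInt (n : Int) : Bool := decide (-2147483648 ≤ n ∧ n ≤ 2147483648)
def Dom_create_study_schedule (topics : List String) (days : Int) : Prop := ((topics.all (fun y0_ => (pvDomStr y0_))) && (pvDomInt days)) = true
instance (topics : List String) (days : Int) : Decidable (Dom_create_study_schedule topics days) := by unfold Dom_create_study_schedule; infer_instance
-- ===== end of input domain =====

-- B replaces A's day-filling while-loop and its min-rescan remainder pass by a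
-- closed-form per-day comprehension (the r = n mod days leftover topics go to the
-- first r days, which is where A's first-minimum tie-breaking always puts them).

-- ===== PORT A =====
-- the body of A's `for _ in range(topics_per_day)` loop
def cssStep (topics : List String) (key : String) (p : Nat × PySem.Dict String (List String)) :
    Nat × PySem.Dict String (List String) :=
  if p.1 < topics.length then
    (p.1 + 1, p.2.modify key [] (fun l => l ++ [PySem.List.pyGetD topics (p.1 : Int) ""]))
  else p

-- A's `while topic_index < len(topics) and current_day <= days` loop
def cssLoop (topics : List String) (tpd days cd : Int) (ti : Nat)
    (sch : PySem.Dict String (List String)) : Nat × PySem.Dict String (List String) :=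
  if h : ti < topics.length ∧ cd ≤ days then
    let key := "Day " ++ PySem.Int.toStr cd
    let st := (PySem.List.pyRange 0 tpd 1).foldl (fun p _ => cssStep topics key p) (ti, sch.insert key [])
    cssLoop topics tpd days (cd + 1) st.1 st.2
  else (ti, sch)
termination_by (days + 1 - cd).toNat
decreasing_by omega

def create_study_schedule (topics : List String) (days : Int) : List (String × List String) :=
  if topics.isEmpty ∨ days ≤ 0 then []
  else
    let tpd : Int := max 1 (PySem.Int.floordiv (topics.length : Int) days)
    let st := cssLoop topics tpd days 1 0 PySem.Dict.empty
    if st.1 < topics.length then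
      -- `min(schedule.keys(), key=...)` always succeeds (the schedule is nonempty);
      -- the `none` match arm is unreachable
      ((PySem.List.slice topics (some (st.1 : Int)) none).foldl (fun s t =>
        match PySem.List.min? s.keys (fun k => (s.getD k []).length) with
        | some mk => s.modify mk [] (fun l => l ++ [t])
        | none => s) st.2).items
    else st.2.items

-- ===== PORT B =====
def create_study_schedule_alt (topics : List String) (days : Int) : List (String × List String) :=
  if topics.isEmpty ∨ days ≤ 0 then []
  else
    let n : Int := (topics.length : Int)
    if n < days then
      (PySem.List.pyRange 0 n 1).map (fun i =>
        ("Day " ++ PySem.Int.toStr (i + 1), [PySem.List.pyGetD topics i ""]))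
    else
      let q := PySem.Int.floordiv n days
      let r := PySem.Int.mod n days
      (PySem.List.pyRange 0 days 1).map (fun i =>
        ("Day " ++ PySem.Int.toStr (i + 1),
          PySem.List.slice topics (some (i * q)) (some ((i + 1) * q)) ++
            (if i < r then [PySem.List.pyGetD topics (q * days + i) ""] else [])))

-- ===== PRECONDITION & SPEC =====
def Spec_create_study_schedule (topics : List String) (days : Int) (out : List (String × List String)) : Prop := out = create_study_schedule_alt topics days
instance (topics : List String) (days : Int) (out : List (String × List String)) : Decidable (Spec_create_study_schedule topics days out) := by unfold Spec_create_study_schedule; infer_instance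

-- ===== CLAIM (what is proved, stated in full; the proofs are below) =====
def Claim_equal_create_study_schedule : Prop := ∀ (topics : List String) (days : Int), Dom_create_study_schedule topics days → Spec_create_study_schedule topics days (create_study_schedule topics days)

-- ===== LEMMAS AND PROOFS =====

-- --- `Nat.toDigits 10` is injective (the "Day i" keys are pairwise distinct) ---
def pvNum (cs : List Char) : Nat := cs.foldl (fun a c => 10 * a + (c.toNat - 48)) 0

theorem pvNum_append_singleton (cs : List Char) (c : Char) :
    pvNum (cs ++ [c]) = 10 * pvNum cs + (c.toNat - 48) := by
  simp [pvNum]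

theorem digitChar_toNat {m : Nat} (h : m < 10) : (Nat.digitChar m).toNat = m + 48 := by
  interval_cases m <;> rfl

theorem toDigitsCore_append (f : Nat) : ∀ (n : Nat) (l : List Char), n ≤ f →
    Nat.toDigitsCore 10 (f + 1) n l = Nat.toDigitsCore 10 (f + 1) n [] ++ l := by
  induction f with
  | zero =>
    intro n l h
    have hn : n = 0 := by omega
    subst hn
    simp [Nat.toDigitsCore]
  | succ f ih =>
    intro n l h
    by_cases h0 : n / 10 = 0
    · conv_lhs => rw [Nat.toDigitsCore]
      conv_rhs => rw [Nat.toDigitsCore]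
      simp [h0]
    · have hlt : n / 10 < n := Nat.div_lt_self (by omega) (by omega)
      have hle : n / 10 ≤ f := by omega
      conv_lhs => rw [Nat.toDigitsCore]
      conv_rhs => rw [Nat.toDigitsCore]
      rw [if_neg h0, if_neg h0]
      rw [ih (n / 10) (Nat.digitChar (n % 10) :: l) hle,
          ih (n / 10) [Nat.digitChar (n % 10)] hle]
      simp

theorem pvNum_toDigitsCore (f : Nat) : ∀ n : Nat, n ≤ f →
    pvNum (Nat.toDigitsCore 10 (f + 1) n []) = n := by
  induction f with
  | zero =>
    intro n h
    have hn : n = 0 := by omega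
    subst hn; rfl
  | succ f ih =>
    intro n h
    by_cases h0 : n / 10 = 0
    · have hlt : n < 10 := by omega
      rw [Nat.toDigitsCore, if_pos h0]
      show pvNum [Nat.digitChar (n % 10)] = n
      simp [pvNum, digitChar_toNat (Nat.mod_lt n (by omega) : n % 10 < 10)]
      omega
    · have hlt : n / 10 < n := Nat.div_lt_self (by omega) (by omega)
      have hle : n / 10 ≤ f := by omega
      rw [Nat.toDigitsCore, if_neg h0]
      rw [toDigitsCore_append f (n / 10) [Nat.digitChar (n % 10)] hle,
          pvNum_append_singleton, ih (n / 10) hle,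
          digitChar_toNat (Nat.mod_lt n (by omega) : n % 10 < 10)]
      omega

def dayKey (i : Int) : String := "Day " ++ PySem.Int.toStr i

theorem toDigits_inj {a b : Nat} (h : Nat.toDigits 10 a = Nat.toDigits 10 b) : a = b := by
  have ha := pvNum_toDigitsCore a a le_rfl
  have hb := pvNum_toDigitsCore b b le_rfl
  unfold Nat.toDigits at h
  rw [h] at ha; omega

theorem dayKey_inj {a b : Int} (ha : 0 ≤ a) (hb : 0 ≤ b) (h : dayKey a = dayKey b) : a = b := by
  have h2 := congrArg String.toList h
  simp only [dayKey, String.toList_append, PySem.Int.toList_toStr] at h2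
  have h3 : PySem.Int.toChars a = PySem.Int.toChars b := List.append_cancel_left h2
  simp only [PySem.Int.toChars, if_neg (by omega : ¬ a < 0), if_neg (by omega : ¬ b < 0)] at h3
  have := toDigits_inj h3
  omega

theorem insert_fresh (l : List (String × List String)) (k : String) (v : List String)
    (hk : k ∉ l.map Prod.fst) :
    (PySem.Dict.mk l).insert k v = PySem.Dict.mk (l ++ [(k, v)]) := by
  have hc : (PySem.Dict.mk l).contains k = false := by
    simp only [PySem.Dict.contains, List.any_eq_false]
    intro p hp hke
    exact hk (List.mem_map.mpr ⟨p, hp, by simpa using hke⟩)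
  simp [PySem.Dict.insert, hc]

theorem modify_last (l : List (String × List String)) (k : String) (v : List String)
    (f : List String → List String) (hk : k ∉ l.map Prod.fst) :
    (PySem.Dict.mk (l ++ [(k, v)])).modify k [] f = PySem.Dict.mk (l ++ [(k, f v)]) := by
  have hfind : ∀ p ∈ l, ¬ (p.1 == k) = true := by
    intro p hp hke
    exact hk (List.mem_map.mpr ⟨p, hp, by simpa using hke⟩)
  have hget : (PySem.Dict.mk (l ++ [(k, v)])).getD k [] = v := by
    simp only [PySem.Dict.getD, PySem.Dict.get?, List.find?_append]
    rw [List.find?_eq_none.mpr hfind]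
    simp
  have hcon : (PySem.Dict.mk (l ++ [(k, v)])).contains k = true := by
    simp [PySem.Dict.contains]
  simp only [PySem.Dict.modify, hget, PySem.Dict.insert, hcon, if_true]
  congr 1
  simp only [List.map_append]
  rw [List.map_congr_left (fun p hp => if_neg (hfind p hp))]
  simp

theorem foldl_ignore {α β : Type} (f : α → α) (xs : List β) : ∀ i : α,
    xs.foldl (fun p _ => f p) i = f^[xs.length] i := by
  induction xs with
  | nil => intro i; rfl
  | cons x xs ih => intro i; simp [List.foldl_cons, ih, Function.iterate_succ_apply]

theorem inner_fold (topics : List String) (k : String) : ∀ (m ti : Nat) (v : List String)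
    (l : List (String × List String)), ti ≤ topics.length → k ∉ l.map Prod.fst →
    (cssStep topics k)^[m] (ti, PySem.Dict.mk (l ++ [(k, v)])) =
      (min (ti + m) topics.length,
       PySem.Dict.mk (l ++ [(k, v ++ ((topics.drop ti).take (min m (topics.length - ti))))])) := by
  intro m
  induction m with
  | zero =>
    intro ti v l hti hk
    simp [Nat.min_eq_left hti]
  | succ m ih =>
    intro ti v l hti hk
    rw [Function.iterate_succ_apply]
    by_cases hlt : ti < topics.length
    · have hstep : cssStep topics k (ti, PySem.Dict.mk (l ++ [(k, v)])) =
          (ti + 1, PySem.Dict.mk (l ++ [(k, v ++ [topics[ti]])])) := by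
        simp only [cssStep, if_pos hlt]
        rw [modify_last l k v _ hk]
        rw [PySem.List.pyGetD_eq_getElem (xs := topics) (d := "") (by omega) (by simpa using hlt)]
        simp
      rw [hstep, ih (ti + 1) _ l (by omega) hk]
      have h1 : min (ti + 1 + m) topics.length = min (ti + (m + 1)) topics.length := by omega
      have h2 : min (m + 1) (topics.length - ti) = min m (topics.length - (ti + 1)) + 1 := by omega
      have h3 : topics.drop ti = topics[ti] :: topics.drop (ti + 1) :=
        List.drop_eq_getElem_cons hlt
      rw [h1, h2, h3, List.take_succ_cons]
      simp
    · have hti' : ti = topics.length := by omega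
      have hstep : cssStep topics k (ti, PySem.Dict.mk (l ++ [(k, v)])) =
          (ti, PySem.Dict.mk (l ++ [(k, v)])) := by
        simp [cssStep, hlt]
      rw [hstep, ih ti v l hti hk]
      subst hti'
      simp

theorem min?_keep {α : Type} (key : α → Nat) : ∀ (bs : List α) (m : α),
    (∀ b ∈ bs, key m ≤ key b) →
    bs.foldl (fun acc x =>
      match acc with
      | none => some x
      | some m' => if key x < key m' then some x else some m') (some m) = some m := by
  intro bs
  induction bs with
  | nil => intro m h; rfl
  | cons b bs ih =>
    intro m h
    have hb : ¬ key b < key m := by have := h b (by simp); omega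
    simp only [List.foldl_cons, if_neg hb]
    exact ih m (fun x hx => h x (by simp [hx]))

theorem min?_split {α : Type} (key : α → Nat) (as : List α) (m : α) (bs : List α)
    (h1 : ∀ a ∈ as, key m < key a) (h2 : ∀ b ∈ bs, key m ≤ key b) :
    PySem.List.min? (as ++ m :: bs) key = some m := by
  have go : ∀ (as' : List α) (c : α), key m < key c → (∀ a ∈ as', key m < key a) →
      (as' ++ m :: bs).foldl (fun acc x =>
        match acc with
        | none => some x
        | some m' => if key x < key m' then some x else some m') (some c) = some m := by
    intro as'
    induction as' with
    | nil =>
      intro c hc _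
      rw [List.nil_append, List.foldl_cons]
      show List.foldl _ (if key m < key c then some m else some c) bs = some m
      rw [if_pos hc]
      exact min?_keep key bs m h2
    | cons a as' ih =>
      intro c hc ha
      rw [List.cons_append, List.foldl_cons]
      show List.foldl _ (if key a < key c then some a else some c) (as' ++ m :: bs) = some m
      split_ifs
      · exact ih a (ha a (by simp)) (fun x hx => ha x (by simp [hx]))
      · exact ih c hc (fun x hx => ha x (by simp [hx]))
  cases as with
  | nil =>
    simp only [PySem.List.min?, List.nil_append, List.foldl_cons]
    exact min?_keep key bs m h2
  | cons a as =>
    simp only [PySem.List.min?, List.cons_append, List.foldl_cons]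
    show List.foldl _ (some a) (as ++ m :: bs) = some m
    exact go as a (h1 a (by simp)) (fun x hx => h1 x (by simp [hx]))

theorem find?_map_key {α : Type} (xs : List α) (g : α → String) (v : α → List String) (j : α)
    (hmem : j ∈ xs) (hinj : ∀ a ∈ xs, g a = g j → a = j) :
    List.find? (fun p => p.1 == g j) (xs.map (fun i => (g i, v i))) = some (g j, v j) := by
  induction xs with
  | nil => simp at hmem
  | cons x xs ih =>
    by_cases hx : g x = g j
    · have : x = j := hinj x (by simp) hx
      subst this
      simp
    · have hxj : x ≠ j := fun he => hx (by rw [he])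
      have hmem' : j ∈ xs := by
        rcases List.mem_cons.mp hmem with h | h
        · exact absurd h.symm hxj
        · exact h
      have hbeq : (g x == g j) = false := by simp [hx]
      simp only [List.map_cons, List.find?_cons, hbeq]
      exact ih hmem' (fun a ha => hinj a (by simp [ha]))

theorem getD_map_key {α : Type} (xs : List α) (g : α → String) (v : α → List String) (j : α)
    (hmem : j ∈ xs) (hinj : ∀ a ∈ xs, g a = g j → a = j) :
    (PySem.Dict.mk (xs.map (fun i => (g i, v i)))).getD (g j) [] = v j := by
  simp [PySem.Dict.getD, PySem.Dict.get?, find?_map_key xs g v j hmem hinj]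

theorem modify_map_key {α : Type} [DecidableEq α] (xs : List α) (g : α → String) (v : α → List String) (j : α)
    (f : List String → List String) (hmem : j ∈ xs) (hinj : ∀ a ∈ xs, g a = g j → a = j) :
    (PySem.Dict.mk (xs.map (fun i => (g i, v i)))).modify (g j) [] f =
      PySem.Dict.mk (xs.map (fun i => (g i, if i = j then f (v j) else v i))) := by
  have hcon : (PySem.Dict.mk (xs.map (fun i => (g i, v i)))).contains (g j) = true := by
    simp only [PySem.Dict.contains, List.any_eq_true]
    exact ⟨(g j, v j), List.mem_map.mpr ⟨j, hmem, rfl⟩, by simp⟩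
  simp only [PySem.Dict.modify, getD_map_key xs g v j hmem hinj, PySem.Dict.insert, hcon, if_true]
  congr 1
  rw [List.map_map]
  apply List.map_congr_left
  intro a ha
  by_cases hag : g a = g j
  · have : a = j := hinj a ha hag
    subst this
    simp
  · have haj : a ≠ j := fun he => hag (by rw [he])
    simp [Function.comp, hag, haj]

def itemsA (topics : List String) (qN c : Nat) : List (String × List String) :=
  (List.range c).map (fun (i : Nat) => (dayKey ((i : Int) + 1), (topics.drop (i * qN)).take qN))

def itemsR (topics : List String) (qN dN j : Nat) : List (String × List String) :=
  (List.range dN).map (fun (i : Nat) => (dayKey ((i : Int) + 1),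
    (topics.drop (i * qN)).take qN ++ (if i < j then [topics.getD (dN * qN + i) ""] else [])))

theorem dayKey_fresh (c : Nat) (m : Nat) (hm : c < m) :
    dayKey ((m : Int)) ∉ ((List.range c).map (fun (i : Nat) => dayKey ((i : Int) + 1))) := by
  intro hmem
  rcases List.mem_map.mp hmem with ⟨i, hi, he⟩
  have hic : i < c := List.mem_range.mp hi
  have := dayKey_inj (by omega) (by omega) he
  omega

theorem keys_itemsA (topics : List String) (qN c : Nat) :
    (itemsA topics qN c).map Prod.fst = (List.range c).map (fun (i : Nat) => dayKey ((i : Int) + 1)) := by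
  simp [itemsA]

theorem outer_loop (topics : List String) (days : Int) (qN C : Nat) (hq : 1 ≤ qN)
    (hrun : ∀ c : Nat, c < C → c * qN < topics.length ∧ (c : Int) + 1 ≤ days ∧ (c + 1) * qN ≤ topics.length)
    (hstop : ¬ (C * qN < topics.length ∧ (C : Int) + 1 ≤ days)) :
    ∀ c : Nat, c ≤ C →
      cssLoop topics (qN : Int) days ((c : Int) + 1) (c * qN) (PySem.Dict.mk (itemsA topics qN c)) =
        (C * qN, PySem.Dict.mk (itemsA topics qN C)) := by
  have main : ∀ (k c : Nat), C - c = k → c ≤ C →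
      cssLoop topics (qN : Int) days ((c : Int) + 1) (c * qN) (PySem.Dict.mk (itemsA topics qN c)) =
        (C * qN, PySem.Dict.mk (itemsA topics qN C)) := by
    intro k
    induction k with
    | zero =>
      intro c hk hc
      have : c = C := by omega
      subst this
      rw [cssLoop, dif_neg hstop]
    | succ k ih =>
      intro c hk hc
      have hcC : c < C := by omega
      obtain ⟨h1, h2, h3⟩ := hrun c hcC
      rw [cssLoop, dif_pos ⟨h1, h2⟩]
      simp only [show ("Day " ++ PySem.Int.toStr ((c : Int) + 1)) = dayKey ((c : Int) + 1) from rfl]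
      have hfresh : dayKey ((c : Int) + 1) ∉ (itemsA topics qN c).map Prod.fst := by
        rw [keys_itemsA]
        have := dayKey_fresh c (c + 1) (by omega)
        simpa [Int.natCast_add] using this
      show cssLoop topics (qN : Int) days ((c : Int) + 1 + 1) _ _ = _
      rw [show ((PySem.Dict.mk (itemsA topics qN c)).insert (dayKey ((c : Int) + 1)) []) =
            PySem.Dict.mk (itemsA topics qN c ++ [(dayKey ((c : Int) + 1), [])]) from
          insert_fresh _ _ _ hfresh]
      rw [foldl_ignore, PySem.List.length_pyRange_one]
      have hlen : ((qN : Int) - 0).toNat = qN := by omega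
      rw [hlen]
      rw [inner_fold topics (dayKey ((c : Int) + 1)) qN (c * qN) [] (itemsA topics qN c)
            (by omega) (by rw [keys_itemsA]; have := dayKey_fresh c (c + 1) (by omega);
                           simpa [Int.natCast_add] using this)]
      have hmin1 : min (c * qN + qN) topics.length = (c + 1) * qN := by
        have : (c + 1) * qN = c * qN + qN := by ring
        omega
      have hmin2 : min qN (topics.length - c * qN) = qN := by
        have : (c + 1) * qN = c * qN + qN := by ring
        omega
      rw [hmin1, hmin2]
      have hitems : itemsA topics qN c ++ [(dayKey ((c : Int) + 1), [] ++ (topics.drop (c * qN)).take qN)] =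
          itemsA topics qN (c + 1) := by
        simp [itemsA, List.range_succ]
      rw [hitems]
      have := ih (c + 1) (by omega) (by omega)
      simpa [Int.natCast_add] using this
  intro c hc
  exact main (C - c) c rfl hc

theorem rem_fold (topics : List String) (qN dN rN : Nat) (hq : 1 ≤ qN) (hr : rN < dN)
    (hlen : topics.length = dN * qN + rN) :
    ∀ j : Nat, j ≤ rN →
    (topics.drop (dN * qN + j)).foldl (fun s t =>
        match PySem.List.min? s.keys (fun k => (s.getD k []).length) with
        | some mk => s.modify mk [] (fun l => l ++ [t])
        | none => s) (PySem.Dict.mk (itemsR topics qN dN j)) =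
      PySem.Dict.mk (itemsR topics qN dN rN) := by
  -- abbreviations
  set g : Nat → String := fun i => dayKey ((i : Int) + 1) with hg
  have hginj : ∀ {a b : Nat}, g a = g b → a = b := by
    intro a b h
    have := dayKey_inj (by omega) (by omega) h
    omega
  have hval : ∀ j, itemsR topics qN dN j =
      (List.range dN).map (fun i => (g i,
        (topics.drop (i * qN)).take qN ++ (if i < j then [topics.getD (dN * qN + i) ""] else []))) := by
    intro j; rfl
  have hblock : ∀ i : Nat, i < dN → ((topics.drop (i * qN)).take qN).length = qN := by
    intro i hi
    have h1 : (i + 1) * qN ≤ dN * qN := Nat.mul_le_mul_right _ (by omega)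
    have : (i + 1) * qN = i * qN + qN := by ring
    simp [List.length_take, List.length_drop]
    omega
  have main : ∀ (k j : Nat), rN - j = k → j ≤ rN →
      (topics.drop (dN * qN + j)).foldl (fun s t =>
        match PySem.List.min? s.keys (fun k => (s.getD k []).length) with
        | some mk => s.modify mk [] (fun l => l ++ [t])
        | none => s) (PySem.Dict.mk (itemsR topics qN dN j)) =
      PySem.Dict.mk (itemsR topics qN dN rN) := by
    intro k
    induction k with
    | zero =>
      intro j hk hj
      have : j = rN := by omega
      subst this
      rw [← hlen, List.drop_length, List.foldl_nil]
    | succ k ih =>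
      intro j hk hj
      have hjr : j < rN := by omega
      have hjd : j < dN := by omega
      have hidx : dN * qN + j < topics.length := by omega
      -- peel the head of the remaining-topics list
      rw [List.drop_eq_getElem_cons hidx, List.foldl_cons]
      have hget : topics[dN * qN + j] = topics.getD (dN * qN + j) "" :=
        (List.getD_eq_getElem topics "" hidx).symm
      -- value lookup on the current schedule
      have hvals : ∀ i : Nat, i < dN → (PySem.Dict.mk (itemsR topics qN dN j)).getD (g i) [] =
          (topics.drop (i * qN)).take qN ++ (if i < j then [topics.getD (dN * qN + i) ""] else []) := by
        intro i hi
        rw [hval j]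
        exact getD_map_key (List.range dN) g _ i (List.mem_range.mpr hi)
          (fun a _ h => hginj h)
      -- the first minimal key is day j+1
      have hkeys : (PySem.Dict.mk (itemsR topics qN dN j)).keys =
          (List.range j).map g ++ g j ::
            ((List.range (dN - j - 1)).map (fun t => g (j + t + 1))) := by
        show (itemsR topics qN dN j).map Prod.fst = _
        rw [hval j, List.map_map]
        have : dN = j + (1 + (dN - j - 1)) := by omega
        rw [this, List.range_add, List.range_add, List.map_append, List.map_append]
        simp [List.range_succ_eq_map, List.map_map, Function.comp_def]
        intro a _
        congr 1
        omega
      have hmin : PySem.List.min? (PySem.Dict.mk (itemsR topics qN dN j)).keys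
          (fun k => ((PySem.Dict.mk (itemsR topics qN dN j)).getD k []).length) = some (g j) := by
        rw [hkeys]
        apply min?_split
        · intro a ha
          rcases List.mem_map.mp ha with ⟨i, hi, rfl⟩
          have hij : i < j := List.mem_range.mp hi
          rw [hvals i (by omega), hvals j (by omega)]
          simp only [List.length_append, hblock i (by omega), hblock j (by omega),
            if_pos hij, if_neg (lt_irrefl j)]
          simp
        · intro b hb
          rcases List.mem_map.mp hb with ⟨t, ht, rfl⟩
          rw [hvals (j + t + 1) (by have := List.mem_range.mp ht; omega), hvals j (by omega)]
          simp only [List.length_append, hblock (j + t + 1) (by have := List.mem_range.mp ht; omega),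
            hblock j (by omega), if_neg (lt_irrefl j), if_neg (by omega : ¬ j + t + 1 < j)]
          simp
      rw [hmin]
      show (topics.drop (dN * qN + j + 1)).foldl _
          ((PySem.Dict.mk (itemsR topics qN dN j)).modify (g j) []
            (fun l => l ++ [topics[dN * qN + j]])) = _
      rw [hval j, modify_map_key (List.range dN) g _ j _ (List.mem_range.mpr hjd)
            (fun a _ h => hginj h)]
      have hstep : (List.range dN).map (fun i => (g i,
          if i = j then ((topics.drop (j * qN)).take qN ++
              (if j < j then [topics.getD (dN * qN + j) ""] else [])) ++ [topics[dN * qN + j]]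
          else (topics.drop (i * qN)).take qN ++ (if i < j then [topics.getD (dN * qN + i) ""] else []))) =
          itemsR topics qN dN (j + 1) := by
        rw [hval (j + 1)]
        apply List.map_congr_left
        intro i hi
        by_cases hij : i = j
        · subst hij
          rw [if_pos rfl, if_neg (lt_irrefl i), if_pos (Nat.lt_succ_self i)]
          simp [hget]
        · rw [if_neg hij]
          congr 2
          by_cases h' : i < j
          · rw [if_pos h', if_pos (show i < j + 1 by omega)]
          · rw [if_neg h', if_neg (show ¬ i < j + 1 by omega)]
      rw [hstep]
      have := ih (j + 1) (by omega) (by omega)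
      simpa using this
  intro j hj
  exact main (rN - j) j rfl hj

-- glue: B's per-day entry in the n < days case
theorem take_one_drop (topics : List String) (i : Nat) (hi : i < topics.length) :
    (topics.drop i).take 1 = [topics.getD i ""] := by
  rw [List.drop_eq_getElem_cons hi, List.take_succ_cons, List.take_zero,
    List.getD_eq_getElem topics "" hi]

theorem create_study_schedule_spec : Claim_equal_create_study_schedule := by
  intro topics days _
  show create_study_schedule topics days = create_study_schedule_alt topics days
  by_cases hbase : topics.isEmpty ∨ days ≤ 0
  · rw [create_study_schedule, create_study_schedule_alt, if_pos hbase, if_pos hbase]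
  · have hne : topics.length ≠ 0 := by
      intro h
      exact hbase (Or.inl (by simpa [List.isEmpty_iff_length_eq_zero] using h))
    have hdpos : 0 < days := by
      rcases not_or.mp hbase with ⟨_, h2⟩
      omega
    obtain ⟨dN, rfl⟩ : ∃ dN : Nat, days = (dN : Int) :=
      ⟨days.toNat, (Int.toNat_of_nonneg (by omega)).symm⟩
    have hdN : 1 ≤ dN := by exact_mod_cast hdpos
    rw [create_study_schedule, create_study_schedule_alt, if_neg hbase, if_neg hbase]
    simp only [PySem.Int.floordiv_natCast]
    set n := topics.length with hn
    by_cases hcase : (n : Int) < (dN : Int)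
    · -- fewer topics than days: one topic per day
      have hnd : n < dN := by exact_mod_cast hcase
      have hq0 : n / dN = 0 := Nat.div_eq_of_lt hnd
      rw [if_pos hcase, hq0]
      have houter := outer_loop topics (dN : Int) 1 n le_rfl
        (fun c hc => ⟨by omega, by omega, by omega⟩)
        (by omega)
        0 (Nat.zero_le n)
      simp only [Nat.mul_one, Nat.zero_mul, Nat.cast_zero, zero_add] at houter
      have hstart : (max 1 ((0 : Nat) : Int)) = ((1 : Nat) : Int) := by simp
      rw [hstart]
      have hempty : (PySem.Dict.empty : PySem.Dict String (List String)) =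
          PySem.Dict.mk (itemsA topics 1 0) := by
        simp [PySem.Dict.empty, itemsA]
      rw [hempty, houter]
      rw [if_neg (lt_irrefl n)]
      -- compare the two item lists
      show itemsA topics 1 n = _
      rw [PySem.List.pyRange_one]
      simp only [Int.sub_zero, Int.toNat_natCast, List.map_map]
      apply List.map_congr_left
      intro i hi
      have hilt : i < n := List.mem_range.mp hi
      simp only [itemsA, Function.comp, zero_add, Nat.mul_one]
      rw [PySem.List.pyGetD_natCast, take_one_drop topics i (by omega)]
      rfl
    · -- at least as many topics as days: blocks of size q = n // days, remainder r = n % days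
      have hnd : dN ≤ n := by exact_mod_cast not_lt.mp hcase
      set qN := n / dN with hqN
      set rN := n % dN with hrN
      have hq1 : 1 ≤ qN := (Nat.one_le_div_iff (by omega)).mpr hnd
      have hsplit : n = dN * qN + rN := by
        rw [hqN, hrN]
        exact (Nat.div_add_mod n dN).symm
      have hrd : rN < dN := Nat.mod_lt _ (by omega)
      rw [if_neg hcase]
      have hmax : (max 1 ((qN : Nat) : Int)) = ((qN : Nat) : Int) :=
        max_eq_right (by exact_mod_cast hq1)
      rw [hmax]
      have houter := outer_loop topics (dN : Int) qN dN hq1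
        (fun c hc => by
          have hmul : (c + 1) * qN = c * qN + qN := by ring
          have hle : (c + 1) * qN ≤ dN * qN := Nat.mul_le_mul_right qN (by omega)
          exact ⟨by omega, by omega, by omega⟩)
        (by
          rintro ⟨-, habs⟩
          omega)
        0 (Nat.zero_le dN)
      simp only [Nat.zero_mul, Nat.cast_zero, zero_add] at houter
      have hempty : (PySem.Dict.empty : PySem.Dict String (List String)) =
          PySem.Dict.mk (itemsA topics qN 0) := by
        simp [PySem.Dict.empty, itemsA]
      rw [hempty, houter]
      have hAR0 : itemsA topics qN dN = itemsR topics qN dN 0 := by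
        simp [itemsA, itemsR]
      -- B's right-hand side equals the A-side item list `itemsR topics qN dN rN`
      have hB : (PySem.List.pyRange 0 (dN : Int) 1).map (fun i =>
            ("Day " ++ PySem.Int.toStr (i + 1),
              PySem.List.slice topics (some (i * ((qN : Nat) : Int))) (some ((i + 1) * ((qN : Nat) : Int))) ++
                (if i < PySem.Int.mod (n : Int) (dN : Int) then
                  [PySem.List.pyGetD topics (((qN : Nat) : Int) * (dN : Int) + i) ""] else []))) =
          itemsR topics qN dN rN := by
        rw [PySem.List.pyRange_one]
        simp only [Int.sub_zero, Int.toNat_natCast, List.map_map, PySem.Int.mod_natCast]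
        apply List.map_congr_left
        intro i hi
        have hilt : i < dN := List.mem_range.mp hi
        simp only [Function.comp, zero_add, Nat.cast_lt]
        have hc1 : ((i : Int)) * ((qN : Nat) : Int) = (((i * qN : Nat)) : Int) := by push_cast; ring
        have hc2 : ((i : Int) + 1) * ((qN : Nat) : Int) = ((((i + 1) * qN : Nat)) : Int) := by
          push_cast; ring
        have hc3 : ((qN : Nat) : Int) * (dN : Int) + (i : Int) = (((dN * qN + i : Nat)) : Int) := by
          push_cast; ring
        rw [hc1, hc2, hc3, PySem.List.slice_natCast, PySem.List.pyGetD_natCast]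
        have hc4 : (i + 1) * qN - i * qN = qN := by
          have : (i + 1) * qN = i * qN + qN := by ring
          omega
        rw [hc4]
        rfl
      by_cases hr0 : rN = 0
      · -- no remainder: the loop consumed everything
        rw [show dN * qN = n by omega]
        rw [if_neg (lt_irrefl n)]
        show itemsA topics qN dN = _
        rw [hB, hAR0, hr0]
      · -- distribute the r leftover topics
        rw [if_pos (show dN * qN < n by omega)]
        show ((PySem.List.slice topics (some ((dN * qN : Nat) : Int)) none).foldl _
            (PySem.Dict.mk (itemsA topics qN dN))).items = _
        rw [PySem.List.slice_from_natCast, hAR0]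
        have hfold := rem_fold topics qN dN rN hq1 hrd hsplit 0 (Nat.zero_le rN)
        simp only [Nat.add_zero] at hfold
        rw [hfold, hB]
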